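-- pv_equiv track=rewrite | github.com/vaishu567/dsapracrepo | Python/graphs/bfs+dfs/distinctislands.py | dfs
-- ===== SOURCE A (Python) =====
-- def dfs(mat,i,j,vis,temp,n,m,row0,col0):
--     vis[i][j]=1
--     delta=[-1,1]
--     temp.append((i-row0,j-col0))
--     for d in delta:
--         row=i+d
--         col=j+d
--         if 0<=row<n and mat[row][j]==1 and vis[row][j]==0:
--             temp=dfs(mat,row,j,vis,temp,n,m,row0,col0)
--         if 0<=col<m and mat[i][col]==1 and vis[i][col]==0:
--             temp=dfs(mat,i,col,vis,temp,n,m,row0,col0)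
--     return temp
-- ===== SOURCE B (Python) =====
-- def dfs(mat, i, j, vis, temp, n, m, row0, col0):
--     # Iterative flood fill with an explicit stack instead of recursion.
--     # The seed cell is processed unconditionally (as in the recursive version);
--     # neighbors are pushed so that they pop in the order up, left, down, right,
--     # and the visited/bounds/land checks happen at pop time.
--     vis[i][j] = 1
--     temp.append((i - row0, j - col0))
--     stack = [(i, j + 1), (i + 1, j), (i, j - 1), (i - 1, j)]
--     while stack:
--         r, c = stack.pop()
--         if 0 <= r < n and 0 <= c < m and mat[r][c] == 1 and vis[r][c] == 0:
--             vis[r][c] = 1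
--             temp.append((r - row0, c - col0))
--             stack.extend(((r, c + 1), (r + 1, c), (r, c - 1), (r - 1, c)))
--     return temp
-- ===== Notes on version B (the rewrite author's own statement) =====
-- stated objective: alternative
-- what changed: Replaced the recursive four-way DFS by an iterative flood fill over an explicit stack, with neighbors pushed in reverse so they pop in the recursive order and the bounds/land/visited checks deferred to pop time.
-- outside the precondition, e.g. on dfs([[1, 1]], 0, 0, [[0]], [], 1, 2, 0, 0): A raises IndexError, B raises IndexError
import Mathlib
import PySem

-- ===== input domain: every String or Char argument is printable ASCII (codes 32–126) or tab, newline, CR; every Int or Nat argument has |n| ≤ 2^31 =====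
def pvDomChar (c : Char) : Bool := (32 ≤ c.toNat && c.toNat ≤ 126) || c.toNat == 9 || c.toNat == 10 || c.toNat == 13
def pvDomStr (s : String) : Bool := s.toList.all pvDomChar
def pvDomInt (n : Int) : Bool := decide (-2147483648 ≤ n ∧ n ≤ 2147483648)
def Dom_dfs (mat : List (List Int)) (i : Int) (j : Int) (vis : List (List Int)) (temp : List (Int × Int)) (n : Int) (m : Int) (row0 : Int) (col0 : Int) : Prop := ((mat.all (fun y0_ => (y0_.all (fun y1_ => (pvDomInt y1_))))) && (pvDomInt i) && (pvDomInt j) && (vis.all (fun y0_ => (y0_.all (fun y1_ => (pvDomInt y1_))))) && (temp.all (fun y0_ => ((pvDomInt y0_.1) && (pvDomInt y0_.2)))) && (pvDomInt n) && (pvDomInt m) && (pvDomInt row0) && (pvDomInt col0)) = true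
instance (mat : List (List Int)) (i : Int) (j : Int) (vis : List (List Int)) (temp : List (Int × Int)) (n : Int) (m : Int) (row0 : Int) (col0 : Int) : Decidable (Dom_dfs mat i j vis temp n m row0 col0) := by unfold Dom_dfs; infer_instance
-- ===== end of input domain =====

-- B replaces A's recursive DFS by an iterative explicit-stack flood fill (same cost); both Pythons
-- mutate vis and temp in place identically — the equivalence proved here is about the return value.

-- ===== PORT A =====
-- grid[r][c] as Python evaluates it (two chained subscripts; none = IndexError)
def getCell (g : List (List Int)) (r c : Int) : Option Int :=
  match PySem.List.pyGet? g r with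
  | some row => PySem.List.pyGet? row c
  | none => none

-- grid[r][c] = v (Python's in-place assignment; a no-op where Python would raise, which Pre_ excludes)
def setCell (g : List (List Int)) (r c : Int) (v : Int) : List (List Int) :=
  PySem.List.pySetD g r (PySem.List.pySetD (PySem.List.pyGetD g r []) c v)

-- number of unvisited cells; used only as a fuel bound / termination measure for the two ports
def zeros (g : List (List Int)) : Nat := (g.map (fun row => row.count 0)).sum

-- cited by loopB's decreasing_by (the port needs it for termination): reading a 0 at a cell and
-- setting that cell to 1 strictly decreases the number of unvisited cells
theorem zeros_setCell_lt (g : List (List Int)) (r c : Int) (h : getCell g r c = some 0) :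
    zeros (setCell g r c 1) < zeros g := by
  have count_set_lt : ∀ (row : List Int) (k : Nat), row[k]? = some 0 →
      (row.set k 1).count 0 < row.count 0 := by
    intro row
    induction row with
    | nil => intro k hk; simp at hk
    | cons x xs ih =>
      intro k hk
      cases k with
      | zero =>
        simp at hk
        simp [hk]
      | succ k =>
        simp at hk
        simp only [List.set, List.count_cons]
        have := ih k hk
        omega
  have zeros_set_lt : ∀ (g : List (List Int)) (k : Nat) (row row' : List Int),
      g[k]? = some row → row'.count 0 < row.count 0 → zeros (g.set k row') < zeros g := by
    intro g
    induction g with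
    | nil => intro k row row' hg; simp at hg
    | cons x xs ih =>
      intro k row row' hg hlt
      cases k with
      | zero => simp at hg; subst hg; simp [zeros]; omega
      | succ k =>
        simp at hg
        have := ih k row row' hg hlt
        simp only [zeros, List.set, List.map_cons, List.sum_cons] at *
        omega
  unfold getCell at h
  cases hrow : PySem.List.pyGet? g r with
  | none => rw [hrow] at h; simp at h
  | some row =>
    rw [hrow] at h; dsimp only at h
    unfold PySem.List.pyGet? at hrow h
    cases hk : PySem.List.pyIdx? g.length r with
    | none => rw [hk] at hrow; simp at hrow
    | some k =>
      rw [hk] at hrow; dsimp only [Option.bind] at hrow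
      cases hk2 : PySem.List.pyIdx? row.length c with
      | none => rw [hk2] at h; simp at h
      | some k2 =>
        rw [hk2] at h; dsimp only [Option.bind] at h
        unfold setCell PySem.List.pySetD PySem.List.pySet? PySem.List.pyGetD PySem.List.pyGet?
        rw [hk]
        dsimp only [Option.bind]
        simp only [hrow, Option.getD_some]
        rw [hk2]
        simp only [Option.map_some, Option.getD_some]
        exact zeros_set_lt g k row (row.set k2 1) hrow (count_set_lt row k2 h)

-- literal transliteration of A's recursive body; the loop `for d in [-1,1]` with its two ifs is the
-- four guarded recursions in A's order (up, left, down, right), threading the shared vis/temp state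
def dfsA (fuel : Nat) (mat : List (List Int)) (i j : Int) (vis : List (List Int)) (temp : List (Int × Int)) (n m row0 col0 : Int) : List (List Int) × List (Int × Int) :=
  match fuel with
  | 0 => (vis, temp)
  | fuel + 1 =>
    let vis1 := setCell vis i j 1
    let temp1 := temp ++ [(i - row0, j - col0)]
    let s1 := if 0 ≤ i - 1 ∧ i - 1 < n ∧ getCell mat (i-1) j = some 1 ∧ getCell vis1 (i-1) j = some 0
              then dfsA fuel mat (i-1) j vis1 temp1 n m row0 col0 else (vis1, temp1)
    let s2 := if 0 ≤ j - 1 ∧ j - 1 < m ∧ getCell mat i (j-1) = some 1 ∧ getCell s1.1 i (j-1) = some 0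
              then dfsA fuel mat i (j-1) s1.1 s1.2 n m row0 col0 else s1
    let s3 := if 0 ≤ i + 1 ∧ i + 1 < n ∧ getCell mat (i+1) j = some 1 ∧ getCell s2.1 (i+1) j = some 0
              then dfsA fuel mat (i+1) j s2.1 s2.2 n m row0 col0 else s2
    let s4 := if 0 ≤ j + 1 ∧ j + 1 < m ∧ getCell mat i (j+1) = some 1 ∧ getCell s3.1 i (j+1) = some 0
              then dfsA fuel mat i (j+1) s3.1 s3.2 n m row0 col0 else s3
    s4

def dfs (mat : List (List Int)) (i : Int) (j : Int) (vis : List (List Int)) (temp : List (Int × Int)) (n : Int) (m : Int) (row0 : Int) (col0 : Int) : List (Int × Int) :=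
  (dfsA (zeros vis + 1) mat i j vis temp n m row0 col0).2

-- ===== PORT B =====
-- the while loop of Source B; the Lean list is the stack with its head = Python's top (popped end)
def loopB (mat : List (List Int)) (n m row0 col0 : Int) : List (Int × Int) → List (List Int) → List (Int × Int) → List (List Int) × List (Int × Int)
  | [], vis, temp => (vis, temp)
  | (r, c) :: rest, vis, temp =>
    if h : 0 ≤ r ∧ r < n ∧ 0 ≤ c ∧ c < m ∧ getCell mat r c = some 1 ∧ getCell vis r c = some 0
    then loopB mat n m row0 col0 ((r-1,c) :: (r,c-1) :: (r+1,c) :: (r,c+1) :: rest) (setCell vis r c 1) (temp ++ [(r - row0, c - col0)])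
    else loopB mat n m row0 col0 rest vis temp
termination_by stack vis _ => (zeros vis, stack.length)
decreasing_by
  · exact Prod.Lex.left _ _ (zeros_setCell_lt _ _ _ h.2.2.2.2.2)
  · exact Prod.Lex.right _ (Nat.lt_succ_self _)

def dfs_alt (mat : List (List Int)) (i : Int) (j : Int) (vis : List (List Int)) (temp : List (Int × Int)) (n : Int) (m : Int) (row0 : Int) (col0 : Int) : List (Int × Int) :=
  (loopB mat n m row0 col0 [(i-1,j), (i,j-1), (i+1,j), (i,j+1)] (setCell vis i j 1) (temp ++ [(i - row0, j - col0)])).2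

-- ===== PRECONDITION & SPEC =====
-- a root neighbor guard that fails without raising: its bounds test fails, or the mat cell reads as
-- water, or the mat cell is land but the vis cell reads as already visited
def failsAt (bnd : Prop) [Decidable bnd] (mat v : List (List Int)) (r c : Int) : Prop :=
  ¬bnd ∨ (getCell mat r c ≠ none ∧ getCell mat r c ≠ some 1)
  ∨ (getCell mat r c = some 1 ∧ getCell v r c ≠ none ∧ getCell v r c ≠ some 0)

-- Pre_ admits (a) starts inside the declared n×m box when mat and vis are at least that big there
-- (A's whole traversal stays inside the box and never raises), and (b) starts whose four neighbor
-- guards all fail safely, where only the start cell is touched; it excludes inputs on which A's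
-- out-of-box accesses generally raise IndexError, and the starts outside the box from which the fill
-- spreads — there A's result rests on Python's accidental negative-index wraparound.
def Pre_dfs (mat : List (List Int)) (i : Int) (j : Int) (vis : List (List Int)) (temp : List (Int × Int)) (n : Int) (m : Int) (row0 : Int) (col0 : Int) : Prop :=
  (0 ≤ i ∧ i < n ∧ 0 ≤ j ∧ j < m ∧ n ≤ (mat.length : Int) ∧ n ≤ (vis.length : Int) ∧
    (∀ row ∈ mat.take n.toNat, m ≤ (row.length : Int)) ∧ (∀ row ∈ vis.take n.toNat, m ≤ (row.length : Int)))
  ∨ (PySem.Raise.InRange vis.length i ∧ PySem.Raise.InRange (PySem.List.pyGetD vis i []).length j ∧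
      failsAt (0 ≤ i - 1 ∧ i - 1 < n) mat (setCell vis i j 1) (i-1) j ∧
      failsAt (0 ≤ j - 1 ∧ j - 1 < m) mat (setCell vis i j 1) i (j-1) ∧
      failsAt (0 ≤ i + 1 ∧ i + 1 < n) mat (setCell vis i j 1) (i+1) j ∧
      failsAt (0 ≤ j + 1 ∧ j + 1 < m) mat (setCell vis i j 1) i (j+1))
instance (mat : List (List Int)) (i : Int) (j : Int) (vis : List (List Int)) (temp : List (Int × Int)) (n : Int) (m : Int) (row0 : Int) (col0 : Int) : Decidable (Pre_dfs mat i j vis temp n m row0 col0) := by unfold Pre_dfs failsAt; infer_instance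

def pvWitness_dfs : List (List Int) × Int × Int × List (List Int) × (List (Int × Int)) × Int × Int × Int × Int :=
  ([[1, 1], [0, 1]], 0, 0, [[0, 0], [0, 0]], [], 2, 2, 0, 0)

def Spec_dfs (mat : List (List Int)) (i : Int) (j : Int) (vis : List (List Int)) (temp : List (Int × Int)) (n : Int) (m : Int) (row0 : Int) (col0 : Int) (out : List (Int × Int)) : Prop := out = dfs_alt mat i j vis temp n m row0 col0
instance (mat : List (List Int)) (i : Int) (j : Int) (vis : List (List Int)) (temp : List (Int × Int)) (n : Int) (m : Int) (row0 : Int) (col0 : Int) (out : List (Int × Int)) : Decidable (Spec_dfs mat i j vis temp n m row0 col0 out) := by unfold Spec_dfs; infer_instance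

-- ===== CLAIM (what is proved, stated in full; the proofs are below) =====
def Claim_equal_dfs : Prop := ∀ (mat : List (List Int)) (i : Int) (j : Int) (vis : List (List Int)) (temp : List (Int × Int)) (n : Int) (m : Int) (row0 : Int) (col0 : Int), Dom_dfs mat i j vis temp n m row0 col0 → Pre_dfs mat i j vis temp n m row0 col0 → Spec_dfs mat i j vis temp n m row0 col0 (dfs mat i j vis temp n m row0 col0)

-- ===== LEMMAS AND PROOFS =====

theorem failsAt_not_guard {bnd g : Prop} [Decidable bnd] {mat v : List (List Int)} {r c : Int}
    (hf : failsAt bnd mat v r c)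
    (hg : g → bnd ∧ getCell mat r c = some 1 ∧ getCell v r c = some 0) : ¬ g := by
  intro h
  obtain ⟨hb, hm, hv⟩ := hg h
  rcases hf with h1 | ⟨_, h2⟩ | ⟨_, _, h3⟩
  · exact h1 hb
  · exact h2 hm
  · exact h3 hv

theorem pyIdx_lt {len : Nat} {r : Int} {k : Nat} (h : PySem.List.pyIdx? len r = some k) : k < len := by
  unfold PySem.List.pyIdx? at h
  split_ifs at h with h1 h2 h3 <;> simp_all <;> omega

theorem count_set_le (row : List Int) (k : Nat) : (row.set k 1).count 0 ≤ row.count 0 := by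
  induction row generalizing k with
  | nil => simp
  | cons x xs ih =>
    cases k with
    | zero => simp [List.count_cons]
    | succ k => simp only [List.set, List.count_cons]; have := ih k; omega

theorem zeros_set_le (g : List (List Int)) (k : Nat) (row' : List Int)
    (h : ∀ row, g[k]? = some row → row'.count 0 ≤ row.count 0) :
    zeros (g.set k row') ≤ zeros g := by
  induction g generalizing k with
  | nil => simp [zeros]
  | cons x xs ih =>
    cases k with
    | zero => have := h x (by simp); simp [zeros]; omega
    | succ k =>
      have := ih k (fun row hr => h row (by simpa using hr))
      simp only [zeros, List.set, List.map_cons, List.sum_cons] at *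
      omega

theorem zeros_setCell_le (g : List (List Int)) (r c : Int) : zeros (setCell g r c 1) ≤ zeros g := by
  unfold setCell PySem.List.pySetD PySem.List.pySet? PySem.List.pyGetD PySem.List.pyGet?
  cases hk : PySem.List.pyIdx? g.length r with
  | none => simp
  | some k =>
    have hklt := pyIdx_lt hk
    simp only [Option.map_some, Option.getD_some, Option.bind]
    apply zeros_set_le
    intro row hrow
    have hgk : g[k]? = some g[k] := by simp [hklt]
    rw [hgk] at hrow; cases hrow
    simp only [hgk, Option.getD_some]
    cases hk2 : PySem.List.pyIdx? (g[k]'hklt).length c with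
    | none => simp
    | some k2 =>
      simp only [Option.map_some, Option.getD_some]
      exact count_set_le (g[k]'hklt) k2

theorem zeros_if_dfsA_le (f : Nat) (mat : List (List Int)) (n m row0 col0 : Int)
    (ih : ∀ (i j : Int) (vis : List (List Int)) (temp : List (Int × Int)),
      zeros (dfsA f mat i j vis temp n m row0 col0).1 ≤ zeros vis)
    (cond : Prop) [Decidable cond] (i' j' : Int) (s : List (List Int) × List (Int × Int)) :
    zeros (if cond then dfsA f mat i' j' s.1 s.2 n m row0 col0 else s).1 ≤ zeros s.1 := by
  split
  · exact ih i' j' s.1 s.2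
  · exact le_rfl

theorem dfsA_zeros_le (fuel : Nat) (mat : List (List Int)) (i j : Int) (vis : List (List Int)) (temp : List (Int × Int)) (n m row0 col0 : Int) :
    zeros (dfsA fuel mat i j vis temp n m row0 col0).1 ≤ zeros vis := by
  induction fuel generalizing i j vis temp with
  | zero => simp [dfsA]
  | succ f ih =>
    simp only [dfsA]
    refine le_trans (zeros_if_dfsA_le f mat n m row0 col0 ih _ _ _ _)
      (le_trans (zeros_if_dfsA_le f mat n m row0 col0 ih _ _ _ _)
        (le_trans (zeros_if_dfsA_le f mat n m row0 col0 ih _ _ _ _)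
          (le_trans (zeros_if_dfsA_le f mat n m row0 col0 ih _ _ _ _)
            (zeros_setCell_le vis i j))))

-- one pop of loopB matches one of A's guarded recursions
theorem step_sim (mat : List (List Int)) (n m row0 col0 : Int) (f : Nat)
    (IH : ∀ (i j : Int) (vis : List (List Int)) (temp : List (Int × Int)) (rest : List (Int × Int)),
      0 ≤ i → i < n → 0 ≤ j → j < m → zeros (setCell vis i j 1) < f →
      loopB mat n m row0 col0 ((i-1,j) :: (i,j-1) :: (i+1,j) :: (i,j+1) :: rest) (setCell vis i j 1) (temp ++ [(i - row0, j - col0)])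
        = loopB mat n m row0 col0 rest (dfsA f mat i j vis temp n m row0 col0).1 (dfsA f mat i j vis temp n m row0 col0).2)
    (r c : Int) (s : List (List Int) × List (Int × Int)) (rest : List (Int × Int))
    (gA : Prop) [Decidable gA]
    (h1 : gA → 0 ≤ r ∧ r < n ∧ 0 ≤ c ∧ c < m ∧ getCell mat r c = some 1 ∧ getCell s.1 r c = some 0)
    (h2 : (0 ≤ r ∧ r < n ∧ 0 ≤ c ∧ c < m ∧ getCell mat r c = some 1 ∧ getCell s.1 r c = some 0) → gA)
    (hz : zeros s.1 ≤ f) :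
    loopB mat n m row0 col0 ((r, c) :: rest) s.1 s.2
      = loopB mat n m row0 col0 rest (if gA then dfsA f mat r c s.1 s.2 n m row0 col0 else s).1
          (if gA then dfsA f mat r c s.1 s.2 n m row0 col0 else s).2 := by
  by_cases hg : gA
  · obtain ⟨hr0, hrn, hc0, hcm, hmat, hvis⟩ := h1 hg
    rw [loopB, dif_pos ⟨hr0, hrn, hc0, hcm, hmat, hvis⟩, if_pos hg]
    exact IH r c s.1 s.2 rest hr0 hrn hc0 hcm (lt_of_lt_of_le (zeros_setCell_lt _ _ _ hvis) hz)
  · rw [loopB, dif_neg (fun hB => hg (h2 hB)), if_neg hg]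

theorem sim (fuel : Nat) (mat : List (List Int)) (n m row0 col0 : Int) :
    ∀ (i j : Int) (vis : List (List Int)) (temp : List (Int × Int)) (rest : List (Int × Int)),
    0 ≤ i → i < n → 0 ≤ j → j < m → zeros (setCell vis i j 1) < fuel →
    loopB mat n m row0 col0 ((i-1,j) :: (i,j-1) :: (i+1,j) :: (i,j+1) :: rest) (setCell vis i j 1) (temp ++ [(i - row0, j - col0)])
      = loopB mat n m row0 col0 rest (dfsA fuel mat i j vis temp n m row0 col0).1 (dfsA fuel mat i j vis temp n m row0 col0).2 := by
  induction fuel with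
  | zero => intro i j vis temp rest _ _ _ _ hf; exact absurd hf (Nat.not_lt_zero _)
  | succ f IH =>
    intro i j vis temp rest hi0 hin hj0 hjm hf
    have hle : ∀ (i' j' : Int) (vis' : List (List Int)) (temp' : List (Int × Int)),
        zeros (dfsA f mat i' j' vis' temp' n m row0 col0).1 ≤ zeros vis' :=
      fun i' j' vis' temp' => dfsA_zeros_le f mat i' j' vis' temp' n m row0 col0
    have hzf : zeros (setCell vis i j 1) ≤ f := Nat.lt_succ_iff.mp hf
    simp only [dfsA]
    -- step 1: up (i-1, j)
    have e1 := step_sim mat n m row0 col0 f IH (i-1) j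
      (setCell vis i j 1, temp ++ [(i - row0, j - col0)])
      ((i,j-1) :: (i+1,j) :: (i,j+1) :: rest)
      (0 ≤ i - 1 ∧ i - 1 < n ∧ getCell mat (i-1) j = some 1 ∧ getCell (setCell vis i j 1) (i-1) j = some 0)
      (fun h => ⟨h.1, h.2.1, hj0, hjm, h.2.2.1, h.2.2.2⟩)
      (fun h => ⟨h.1, h.2.1, h.2.2.2.2⟩) hzf
    refine e1.trans ?_
    generalize hS1 : (if 0 ≤ i - 1 ∧ i - 1 < n ∧ getCell mat (i-1) j = some 1 ∧ getCell (setCell vis i j 1) (i-1) j = some 0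
        then dfsA f mat (i-1) j (setCell vis i j 1) (temp ++ [(i - row0, j - col0)]) n m row0 col0
        else (setCell vis i j 1, temp ++ [(i - row0, j - col0)])) = S1
    have hzS1 : zeros S1.1 ≤ f := by
      rw [← hS1]
      exact le_trans (zeros_if_dfsA_le f mat n m row0 col0 (fun a b c d => hle a b c d) _ _ _ _) hzf
    -- step 2: left (i, j-1)
    have e2 := step_sim mat n m row0 col0 f IH i (j-1) S1 ((i+1,j) :: (i,j+1) :: rest)
      (0 ≤ j - 1 ∧ j - 1 < m ∧ getCell mat i (j-1) = some 1 ∧ getCell S1.1 i (j-1) = some 0)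
      (fun h => ⟨hi0, hin, h.1, h.2.1, h.2.2.1, h.2.2.2⟩)
      (fun h => ⟨h.2.2.1, h.2.2.2.1, h.2.2.2.2⟩) hzS1
    refine e2.trans ?_
    generalize hS2 : (if 0 ≤ j - 1 ∧ j - 1 < m ∧ getCell mat i (j-1) = some 1 ∧ getCell S1.1 i (j-1) = some 0
        then dfsA f mat i (j-1) S1.1 S1.2 n m row0 col0 else S1) = S2
    have hzS2 : zeros S2.1 ≤ f := by
      rw [← hS2]
      exact le_trans (zeros_if_dfsA_le f mat n m row0 col0 (fun a b c d => hle a b c d) _ _ _ S1) hzS1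
    -- step 3: down (i+1, j)
    have e3 := step_sim mat n m row0 col0 f IH (i+1) j S2 ((i,j+1) :: rest)
      (0 ≤ i + 1 ∧ i + 1 < n ∧ getCell mat (i+1) j = some 1 ∧ getCell S2.1 (i+1) j = some 0)
      (fun h => ⟨h.1, h.2.1, hj0, hjm, h.2.2.1, h.2.2.2⟩)
      (fun h => ⟨h.1, h.2.1, h.2.2.2.2⟩) hzS2
    refine e3.trans ?_
    generalize hS3 : (if 0 ≤ i + 1 ∧ i + 1 < n ∧ getCell mat (i+1) j = some 1 ∧ getCell S2.1 (i+1) j = some 0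
        then dfsA f mat (i+1) j S2.1 S2.2 n m row0 col0 else S2) = S3
    have hzS3 : zeros S3.1 ≤ f := by
      rw [← hS3]
      exact le_trans (zeros_if_dfsA_le f mat n m row0 col0 (fun a b c d => hle a b c d) _ _ _ S2) hzS2
    -- step 4: right (i, j+1)
    exact step_sim mat n m row0 col0 f IH i (j+1) S3 rest
      (0 ≤ j + 1 ∧ j + 1 < m ∧ getCell mat i (j+1) = some 1 ∧ getCell S3.1 i (j+1) = some 0)
      (fun h => ⟨hi0, hin, h.1, h.2.1, h.2.2.1, h.2.2.2⟩)
      (fun h => ⟨h.2.2.1, h.2.2.2.1, h.2.2.2.2⟩) hzS3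

-- ===== VERDICT (by name: the statement is the Claim_ definition above) =====
theorem dfs_spec : Claim_equal_dfs := by
  intro mat i j vis temp n m row0 col0 _ hpre
  unfold Spec_dfs dfs dfs_alt
  rcases hpre with ⟨hi0, hin, hj0, hjm, _⟩ | ⟨_, _, hd1, hd3, hd2, hd4⟩
  · have h := sim (zeros vis + 1) mat n m row0 col0 i j vis temp [] hi0 hin hj0 hjm
      (Nat.lt_succ_of_le (zeros_setCell_le vis i j))
    rw [h, loopB]
  · -- no root neighbor passes its guard: both sides return temp ++ [(i-row0, j-col0)]
    have n1 : ¬(0 ≤ i - 1 ∧ i - 1 < n ∧ getCell mat (i-1) j = some 1 ∧ getCell (setCell vis i j 1) (i-1) j = some 0) :=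
      failsAt_not_guard hd1 (fun h => ⟨⟨h.1, h.2.1⟩, h.2.2.1, h.2.2.2⟩)
    have n2 : ¬(0 ≤ j - 1 ∧ j - 1 < m ∧ getCell mat i (j-1) = some 1 ∧ getCell (setCell vis i j 1) i (j-1) = some 0) :=
      failsAt_not_guard hd3 (fun h => ⟨⟨h.1, h.2.1⟩, h.2.2.1, h.2.2.2⟩)
    have n3 : ¬(0 ≤ i + 1 ∧ i + 1 < n ∧ getCell mat (i+1) j = some 1 ∧ getCell (setCell vis i j 1) (i+1) j = some 0) :=
      failsAt_not_guard hd2 (fun h => ⟨⟨h.1, h.2.1⟩, h.2.2.1, h.2.2.2⟩)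
    have n4 : ¬(0 ≤ j + 1 ∧ j + 1 < m ∧ getCell mat i (j+1) = some 1 ∧ getCell (setCell vis i j 1) i (j+1) = some 0) :=
      failsAt_not_guard hd4 (fun h => ⟨⟨h.1, h.2.1⟩, h.2.2.1, h.2.2.2⟩)
    simp only [dfsA]
    rw [if_neg n1]; dsimp only
    rw [if_neg n2]; dsimp only
    rw [if_neg n3]; dsimp only
    rw [if_neg n4]; dsimp only
    rw [loopB, dif_neg (failsAt_not_guard hd1 (fun h => ⟨⟨h.1, h.2.1⟩, h.2.2.2.2.1, h.2.2.2.2.2⟩)),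
        loopB, dif_neg (failsAt_not_guard hd3 (fun h => ⟨⟨h.2.2.1, h.2.2.2.1⟩, h.2.2.2.2.1, h.2.2.2.2.2⟩)),
        loopB, dif_neg (failsAt_not_guard hd2 (fun h => ⟨⟨h.1, h.2.1⟩, h.2.2.2.2.1, h.2.2.2.2.2⟩)),
        loopB, dif_neg (failsAt_not_guard hd4 (fun h => ⟨⟨h.2.2.1, h.2.2.2.1⟩, h.2.2.2.2.1, h.2.2.2.2.2⟩)), loopB]
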